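-- pv_equiv track=rewrite | github.com/Jstafford98/LeetCode | src/merge_strings_alternately_1768.py | zip_longest
-- ===== SOURCE A (Python) =====
-- def zip_longest(s1 : str, s2 : str) -> tuple[str, str] :
--     '''
--         zips two strings together based on the longest iterable
--         when the shorter of the two is exhausted, an empty string
--         will be returned in it's place
--     '''
--
--     lmax = len(s1)
--     rmax = len(s2)
--
--     for i in range(max(lmax, rmax)):
--
--         if i < lmax and i < rmax:
--             yield s1[i], s2[i]
--             continue
--
--         if i < lmax:
--             yield s1[i], ''
--             continue
--
--         yield '', s2[i]
-- ===== SOURCE B (Python) =====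
-- def zip_longest(s1: str, s2: str):
--     # Phase 1: the common prefix, via zip.
--     for c1, c2 in zip(s1, s2):
--         yield c1, c2
--     # Phase 2: the leftover tail of the longer string.
--     if len(s1) > len(s2):
--         for c in s1[len(s2):]:
--             yield c, ''
--     else:
--         for c in s2[len(s1):]:
--             yield '', c
-- ===== Notes on version B (the rewrite author's own statement) =====
-- stated objective: idiomatic
-- what changed: Replaced A's single per-index loop with three-way branching by two branch-free phases: a zip over the common prefix, then one tail loop over the leftover slice of the longer string.
import Mathlib
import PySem

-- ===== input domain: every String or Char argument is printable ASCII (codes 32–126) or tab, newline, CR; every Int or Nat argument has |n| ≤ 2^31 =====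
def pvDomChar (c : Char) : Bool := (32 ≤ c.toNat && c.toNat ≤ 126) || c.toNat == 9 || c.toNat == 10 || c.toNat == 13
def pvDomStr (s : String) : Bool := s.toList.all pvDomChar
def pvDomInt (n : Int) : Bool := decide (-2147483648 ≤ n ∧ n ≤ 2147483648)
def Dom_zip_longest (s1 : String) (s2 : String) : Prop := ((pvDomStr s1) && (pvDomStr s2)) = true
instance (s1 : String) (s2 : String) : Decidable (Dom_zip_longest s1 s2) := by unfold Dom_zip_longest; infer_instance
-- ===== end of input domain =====

-- B replaces A's single per-index loop with three-way branching by a zip over the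
-- common prefix plus one tail loop over the leftover slice (idiomatic decomposition;
-- same cost). Both return the generator's yields as a list of pairs.

-- ===== PORT A =====
-- Literal port of A: one loop over range(max(lmax, rmax)) with the three branches in
-- order. Indices i are always in range of the list they index, so pyGetD's default
-- (here ' ') is never used.
def zip_longest (s1 : String) (s2 : String) : List (String × String) :=
  let c1 := s1.toList
  let c2 := s2.toList
  let lmax : Int := c1.length
  let rmax : Int := c2.length
  (PySem.List.pyRange 0 (max lmax rmax) 1).foldl (fun acc i =>
    if i < lmax ∧ i < rmax then
      acc ++ [(String.mk [PySem.List.pyGetD c1 i ' '], String.mk [PySem.List.pyGetD c2 i ' '])]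
    else if i < lmax then
      acc ++ [(String.mk [PySem.List.pyGetD c1 i ' '], "")]
    else
      acc ++ [("", String.mk [PySem.List.pyGetD c2 i ' '])]) []

-- ===== PORT B =====
-- Literal port of B: phase 1 is zip(s1, s2); phase 2 maps over the slice s1[len(s2):]
-- (resp. s2[len(s1):]) of the longer string.
def zip_longest_alt (s1 : String) (s2 : String) : List (String × String) :=
  let c1 := s1.toList
  let c2 := s2.toList
  let common := (c1.zip c2).map (fun p => (String.mk [p.1], String.mk [p.2]))
  let tl :=
    if c2.length < c1.length then
      (PySem.List.slice c1 (some (c2.length : Int)) none).map (fun c => (String.mk [c], ""))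
    else
      (PySem.List.slice c2 (some (c1.length : Int)) none).map (fun c => ("", String.mk [c]))
  common ++ tl

-- ===== PRECONDITION & SPEC =====
def Spec_zip_longest (s1 : String) (s2 : String) (out : List (String × String)) : Prop := out = zip_longest_alt s1 s2
instance (s1 : String) (s2 : String) (out : List (String × String)) : Decidable (Spec_zip_longest s1 s2 out) := by unfold Spec_zip_longest; infer_instance

-- ===== CLAIM (what is proved, stated in full; the proofs are below) =====
def Claim_equal_zip_longest : Prop := ∀ (s1 : String) (s2 : String), Dom_zip_longest s1 s2 → Spec_zip_longest s1 s2 (zip_longest s1 s2)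

-- ===== LEMMAS AND PROOFS =====

theorem zip_longest_core (c1 c2 : List Char) :
    (PySem.List.pyRange 0 (max (c1.length : Int) (c2.length : Int)) 1).foldl (fun acc i =>
      if i < (c1.length : Int) ∧ i < (c2.length : Int) then
        acc ++ [(String.mk [PySem.List.pyGetD c1 i ' '], String.mk [PySem.List.pyGetD c2 i ' '])]
      else if i < (c1.length : Int) then
        acc ++ [(String.mk [PySem.List.pyGetD c1 i ' '], "")]
      else
        acc ++ [("", String.mk [PySem.List.pyGetD c2 i ' '])]) []
    =
    ((c1.zip c2).map (fun p => (String.mk [p.1], String.mk [p.2]))) ++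
      (if c2.length < c1.length then
        (PySem.List.slice c1 (some (c2.length : Int)) none).map (fun c => (String.mk [c], ""))
      else
        (PySem.List.slice c2 (some (c1.length : Int)) none).map (fun c => ("", String.mk [c]))) := by
  have hbody : (fun (acc : List (String × String)) (i : Int) =>
      if i < (c1.length : Int) ∧ i < (c2.length : Int) then
        acc ++ [(String.mk [PySem.List.pyGetD c1 i ' '], String.mk [PySem.List.pyGetD c2 i ' '])]
      else if i < (c1.length : Int) then
        acc ++ [(String.mk [PySem.List.pyGetD c1 i ' '], "")]
      else
        acc ++ [("", String.mk [PySem.List.pyGetD c2 i ' '])])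
    = (fun acc i => acc ++ [(
      if i < (c1.length : Int) ∧ i < (c2.length : Int) then
        (String.mk [PySem.List.pyGetD c1 i ' '], String.mk [PySem.List.pyGetD c2 i ' '])
      else if i < (c1.length : Int) then
        (String.mk [PySem.List.pyGetD c1 i ' '], "")
      else
        ("", String.mk [PySem.List.pyGetD c2 i ' ']))]) := by
    funext acc i; split_ifs <;> rfl
  rw [hbody, PySem.List.foldl_append_singleton_eq_map]
  rw [show (max (c1.length : Int) (c2.length : Int)) = ((max c1.length c2.length : Nat) : Int) by push_cast; ring_nf]
  rw [PySem.List.pyRange_zero_nat, List.map_map]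
  rw [PySem.List.slice_from (xs := c1) (a := (c2.length : Int)) (by positivity),
      PySem.List.slice_from (xs := c2) (a := (c1.length : Int)) (by positivity)]
  apply List.ext_getElem
  · by_cases h : c2.length < c1.length
    · simp only [if_pos h, List.length_append, List.length_map, List.length_zip, List.length_range, List.length_drop, List.length_nil, Int.toNat_natCast]
      omega
    · simp only [if_neg h, List.length_append, List.length_map, List.length_zip, List.length_range, List.length_drop, List.length_nil, Int.toNat_natCast]
      omega
  · intro k hk hk'
    have hkM : k < max c1.length c2.length := by simpa using hk
    simp only [List.nil_append, List.getElem_map, List.getElem_range, Function.comp_apply,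
      Int.toNat_natCast]
    by_cases h1 : k < c1.length <;> by_cases h2 : k < c2.length
    · rw [if_pos ⟨by exact_mod_cast h1, by exact_mod_cast h2⟩,
        PySem.List.pyGetD_natCast, PySem.List.pyGetD_natCast,
        List.getElem_append_left (by simp [List.length_zip]; omega)]
      simp [List.getElem_zip, h1, h2]
    · have hcase : c2.length < c1.length := by omega
      simp only [if_pos hcase]
      rw [if_neg (by omega), if_pos (by exact_mod_cast h1),
        PySem.List.pyGetD_natCast,
        List.getElem_append_right (by simp [List.length_zip]; omega)]
      simp only [List.length_map, List.length_zip, List.getElem_map, List.getElem_drop]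
      have hidx : c2.length + (k - min c1.length c2.length) = k := by omega
      simp only [hidx]
      rw [List.getD_eq_getElem c1 ' ' h1]
    · have hcase : ¬ (c2.length < c1.length) := by omega
      simp only [if_neg hcase]
      rw [if_neg (by omega), if_neg (by omega),
        PySem.List.pyGetD_natCast,
        List.getElem_append_right (by simp [List.length_zip]; omega)]
      simp only [List.length_map, List.length_zip, List.getElem_map, List.getElem_drop]
      have hidx : c1.length + (k - min c1.length c2.length) = k := by omega
      simp only [hidx]
      rw [List.getD_eq_getElem c2 ' ' h2]
    · omega

-- ===== VERDICT (by name: the statement is the Claim_ definition above) =====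
theorem zip_longest_spec : Claim_equal_zip_longest := by
  intro s1 s2 _
  unfold Spec_zip_longest zip_longest zip_longest_alt
  exact zip_longest_core s1.toList s2.toList
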